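-- pv_equiv track=rewrite | github.com/miseop25/Back_Jun_Code_Study | back_joon/이분탐색/back_joon_10816_숫자카드2/back_joon_10816_ver2.py | checkEqualRight
-- ===== SOURCE A (Python) =====
-- def checkEqualRight(card_list, num, bin_index) :
--     answer = []
--     while True :
--         bin_index = bin_index +1
--         try:
--             if card_list[bin_index] == num :
--                 answer.append(card_list[bin_index])
--             else :
--                 return answer
--         except :
--             return answer
-- ===== SOURCE B (Python) =====
-- # B: slice off the part to the right of bin_index, measure the run of num's at
-- # its front, and build the answer by replication (simpler; no exception-driven loop).
-- def checkEqualRight(card_list, num, bin_index):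
--     tail = card_list[bin_index + 1:]
--     run = 0
--     while run < len(tail) and tail[run] == num:
--         run += 1
--     return [num] * run
-- ===== Notes on version B (the rewrite author's own statement) =====
-- stated objective: simpler
-- what changed: B replaces A's exception-driven while-True index walk by taking the slice card_list[bin_index+1:], counting the leading run of num, and returning [num]*run.
-- intended difference: When bin_index < -1 (and the wrap would matter: list head equals num and either the start is below -len or the whole wrapped suffix equals num), A follows Python's negative-index wraparound and returns [] or extra elements from the front of the list, while B scans the slice card_list[bin_index+1:], the intended 'cards to the right' reading. — e.g. on checkEqualRight([5], 5, -3): A returns [], B returns [5]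
import Mathlib
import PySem

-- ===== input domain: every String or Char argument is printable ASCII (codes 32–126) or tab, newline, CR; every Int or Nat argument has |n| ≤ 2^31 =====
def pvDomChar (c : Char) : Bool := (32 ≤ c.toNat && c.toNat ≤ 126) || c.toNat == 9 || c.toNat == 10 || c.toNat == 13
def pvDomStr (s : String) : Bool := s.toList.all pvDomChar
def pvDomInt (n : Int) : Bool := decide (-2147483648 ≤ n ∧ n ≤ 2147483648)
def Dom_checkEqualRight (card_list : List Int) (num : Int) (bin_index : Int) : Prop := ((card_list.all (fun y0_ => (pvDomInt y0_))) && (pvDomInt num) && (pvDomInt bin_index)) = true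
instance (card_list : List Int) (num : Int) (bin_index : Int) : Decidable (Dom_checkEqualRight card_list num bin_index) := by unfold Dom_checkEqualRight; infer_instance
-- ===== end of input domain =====

-- B replaces A's exception-driven index walk by slice + run length + replication (simpler);
-- on the corner bin_index < -1, A wraps around via Python's negative indexing while B scans the slice.

-- ===== PORT A =====
-- the 'while True' loop: each iteration first increments bin_index, then tries card_list[bin_index]
def checkEqualRightGo (card_list : List Int) (num : Int) (bin_index : Int) (answer : List Int) : List Int :=
  match h : PySem.List.pyGet? card_list (bin_index + 1) with
  | none => answer                                   -- except: IndexError → return answer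
  | some x =>
    if x == num then
      checkEqualRightGo card_list num (bin_index + 1) (answer ++ [x])
    else answer
termination_by (card_list.length - bin_index).toNat
decreasing_by
  have hin : PySem.Raise.InRange card_list.length (bin_index + 1) := by
    by_contra hc
    rw [(PySem.List.pyGet?_eq_none_iff _ _).mpr hc] at h
    cases h
  unfold PySem.Raise.InRange at hin
  omega

def checkEqualRight (card_list : List Int) (num : Int) (bin_index : Int) : List Int :=
  checkEqualRightGo card_list num bin_index []

-- ===== PORT B =====
-- the 'while run < len(tail) and tail[run] == num: run += 1' loop of Source B
def runGo (tail : List Int) (num : Int) (run : Nat) : Nat :=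
  if h : run < tail.length then
    if tail[run] == num then runGo tail num (run + 1) else run
  else run
termination_by tail.length - run

def checkEqualRight_alt (card_list : List Int) (num : Int) (bin_index : Int) : List Int :=
  List.replicate (runGo (PySem.List.slice card_list (some (bin_index + 1)) none) num 0) num

-- ===== PRECONDITION & SPEC =====
-- For bin_index < -1 the start index bin_index+1 is negative, so A reads card_list through Python's
-- negative-index wraparound (from the end of the list, possibly continuing around to the front),
-- returning extra elements or none at all; B scans the slice card_list[bin_index+1:], the intended
-- "cards to the right" reading; D_ is exactly the wrap corner on which the two values differ.
def D_checkEqualRight (card_list : List Int) (num : Int) (bin_index : Int) : Prop :=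
  bin_index + 1 < 0 ∧ card_list.head? = some num ∧
    (bin_index + 1 + (card_list.length : Int) < 0 ∨
      ∀ x ∈ card_list.drop (bin_index + 1 + (card_list.length : Int)).toNat, x = num)
instance (card_list : List Int) (num : Int) (bin_index : Int) : Decidable (D_checkEqualRight card_list num bin_index) := by unfold D_checkEqualRight; infer_instance

def Spec_checkEqualRight (card_list : List Int) (num : Int) (bin_index : Int) (out : List Int) : Prop := ¬ D_checkEqualRight card_list num bin_index → out = checkEqualRight_alt card_list num bin_index
instance (card_list : List Int) (num : Int) (bin_index : Int) (out : List Int) : Decidable (Spec_checkEqualRight card_list num bin_index out) := by unfold Spec_checkEqualRight; infer_instance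

def pvDiffWitness_checkEqualRight : List Int × Int × Int := ([5], 5, -3)
def pvDiffWitnessOut_checkEqualRight : (List Int) × (List Int) := ([], [5])

-- ===== CLAIM (what is proved, stated in full; the proofs are below) =====
def Claim_unchanged_checkEqualRight : Prop := ∀ (card_list : List Int) (num : Int) (bin_index : Int), Dom_checkEqualRight card_list num bin_index → Spec_checkEqualRight card_list num bin_index (checkEqualRight card_list num bin_index)
def Claim_changed_checkEqualRight : Prop := Dom_checkEqualRight (pvDiffWitness_checkEqualRight.1) (pvDiffWitness_checkEqualRight.2.1) (pvDiffWitness_checkEqualRight.2.2) ∧ D_checkEqualRight (pvDiffWitness_checkEqualRight.1) (pvDiffWitness_checkEqualRight.2.1) (pvDiffWitness_checkEqualRight.2.2) ∧ checkEqualRight (pvDiffWitness_checkEqualRight.1) (pvDiffWitness_checkEqualRight.2.1) (pvDiffWitness_checkEqualRight.2.2) = pvDiffWitnessOut_checkEqualRight.1 ∧ checkEqualRight_alt (pvDiffWitness_checkEqualRight.1) (pvDiffWitness_checkEqualRight.2.1) (pvDiffWitness_checkEqualRight.2.2) = pvDiffWitnessOut_checkEqualRight.2 ∧ pvDiffWitnessOut_checkEqualRight.1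 ≠ pvDiffWitnessOut_checkEqualRight.2
def Claim_exact_checkEqualRight : Prop := ∀ (card_list : List Int) (num : Int) (bin_index : Int), Dom_checkEqualRight card_list num bin_index → D_checkEqualRight card_list num bin_index → checkEqualRight card_list num bin_index ≠ checkEqualRight_alt card_list num bin_index

-- ===== LEMMAS AND PROOFS =====

-- one unfolding of A's loop when the index access raises / succeeds
lemma goA_none (card_list : List Int) (num bin_index : Int) (acc : List Int)
    (h : PySem.List.pyGet? card_list (bin_index + 1) = none) :
    checkEqualRightGo card_list num bin_index acc = acc := by
  rw [checkEqualRightGo]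
  split
  · rfl
  · next x hx => rw [h] at hx; cases hx

lemma goA_some (card_list : List Int) (num bin_index : Int) (acc : List Int) (x : Int)
    (h : PySem.List.pyGet? card_list (bin_index + 1) = some x) :
    checkEqualRightGo card_list num bin_index acc =
      if x == num then checkEqualRightGo card_list num (bin_index + 1) (acc ++ [x]) else acc := by
  rw [checkEqualRightGo]
  split
  · next hx => rw [h] at hx; cases hx
  · next y hy =>
    rw [h] at hy
    injection hy with hxy
    subst hxy
    rfl

-- B's run counter is the length of the leading run of num's
lemma runGo_eq (tail : List Int) (num : Int) :
    ∀ fuel r, tail.length - r ≤ fuel →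
      runGo tail num r = r + ((tail.drop r).takeWhile (fun x => x == num)).length := by
  intro fuel
  induction fuel with
  | zero =>
    intro r hr
    rw [runGo]
    have hge : tail.length ≤ r := by omega
    rw [dif_neg (by omega), List.drop_eq_nil_of_le hge]
    simp
  | succ n ih =>
    intro r hr
    rw [runGo]
    by_cases h : r < tail.length
    · rw [dif_pos h]
      have hdrop : tail.drop r = tail[r] :: tail.drop (r + 1) :=
        List.drop_eq_getElem_cons h
      by_cases he : tail[r] == num
      · rw [if_pos he, ih (r + 1) (by omega), hdrop, List.takeWhile_cons]
        simp only [he, if_true, List.length_cons]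
        omega
      · rw [if_neg he, hdrop, List.takeWhile_cons]
        simp [he]
    · rw [dif_neg h, List.drop_eq_nil_of_le (by omega)]
      simp
-- replicating the run length reproduces the takeWhile prefix itself
lemma replicate_takeWhile (num : Int) : ∀ xs : List Int,
    List.replicate ((xs.takeWhile (fun x => x == num)).length) num
      = xs.takeWhile (fun x => x == num) := by
  intro xs
  induction xs with
  | nil => simp
  | cons x t ih =>
    by_cases h : x == num
    · have hx : x = num := by simpa using h
      rw [List.takeWhile_cons]
      simp only [h, if_true, List.length_cons]
      simp [List.replicate_succ, hx, ih]
    · rw [List.takeWhile_cons]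
      simp [h]

-- B computes takeWhile of the slice
lemma alt_eq (card_list : List Int) (num : Int) (bin_index : Int) :
    checkEqualRight_alt card_list num bin_index
      = (PySem.List.slice card_list (some (bin_index + 1)) none).takeWhile (fun x => x == num) := by
  unfold checkEqualRight_alt
  rw [runGo_eq _ num _ 0 (le_refl _)]
  simp [replicate_takeWhile]

-- A in the non-negative region: takeWhile of the suffix
lemma goA_nat (card_list : List Int) (num : Int) :
    ∀ fuel (j : Nat) (acc : List Int), card_list.length - j ≤ fuel →
      checkEqualRightGo card_list num ((j : Int) - 1) acc
        = acc ++ (card_list.drop j).takeWhile (fun x => x == num) := by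
  intro fuel
  induction fuel with
  | zero =>
    intro j acc hj
    have hge : card_list.length ≤ j := by omega
    rw [goA_none _ _ _ _ (by
        rw [PySem.List.pyGet?_eq_none_iff]
        unfold PySem.Raise.InRange
        omega),
      List.drop_eq_nil_of_le hge]
    simp
  | succ n ih =>
    intro j acc hj
    by_cases h : j < card_list.length
    · have hget : PySem.List.pyGet? card_list ((j : Int) - 1 + 1) = some card_list[j] := by
        have harg : (j : Int) - 1 + 1 = (j : Int) := by ring
        rw [harg, PySem.List.pyGet?_natCast, List.getElem?_eq_getElem h]
      rw [goA_some _ _ _ _ _ hget]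
      have hdrop : card_list.drop j = card_list[j] :: card_list.drop (j + 1) :=
        List.drop_eq_getElem_cons h
      by_cases he : card_list[j] == num
      · rw [if_pos he]
        have harg : (j : Int) - 1 + 1 = ((j + 1 : Nat) : Int) - 1 := by push_cast; ring
        rw [harg, ih (j + 1) (acc ++ [card_list[j]]) (by omega), hdrop, List.takeWhile_cons]
        simp [he]
      · rw [if_neg he, hdrop, List.takeWhile_cons]
        simp [he]
    · rw [goA_none _ _ _ _ (by
          rw [PySem.List.pyGet?_eq_none_iff]
          unfold PySem.Raise.InRange
          omega),
        List.drop_eq_nil_of_le (by omega)]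
      simp

-- A in the negative region (index k - length with 0 ≤ k ≤ length): wraparound behaviour
lemma goA_neg (card_list : List Int) (num : Int) :
    ∀ fuel (k : Nat) (acc : List Int), k ≤ card_list.length → card_list.length - k ≤ fuel →
      checkEqualRightGo card_list num ((k : Int) - (card_list.length : Int) - 1) acc
        = if (card_list.drop k).all (fun x => x == num) then
            acc ++ card_list.drop k ++ card_list.takeWhile (fun x => x == num)
          else acc ++ (card_list.drop k).takeWhile (fun x => x == num) := by
  intro fuel
  induction fuel with
  | zero =>
    intro k acc hk hf
    have hkl : k = card_list.length := by omega
    subst hkl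
    have harg : (card_list.length : Int) - (card_list.length : Int) - 1 = ((0 : Nat) : Int) - 1 := by
      push_cast; ring
    rw [harg, goA_nat card_list num (card_list.length + 1) 0 acc (by omega)]
    simp
  | succ n ih =>
    intro k acc hk hf
    by_cases hkl : k = card_list.length
    · subst hkl
      have harg : (card_list.length : Int) - (card_list.length : Int) - 1 = ((0 : Nat) : Int) - 1 := by
        push_cast; ring
      rw [harg, goA_nat card_list num (card_list.length + 1) 0 acc (by omega)]
      simp
    · have hklt : k < card_list.length := by omega
      have hget : PySem.List.pyGet? card_list ((k : Int) - (card_list.length : Int) - 1 + 1)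
          = some card_list[k] := by
        simp only [PySem.List.pyGet?, PySem.List.pyIdx?]
        rw [if_neg (by omega), if_pos (by omega)]
        have h1 : (card_list.length : Nat)
            - (-(((k : Int) - (card_list.length : Int) - 1 + 1))).toNat = k := by omega
        rw [h1]
        simp [List.getElem?_eq_getElem hklt]
      rw [goA_some _ _ _ _ _ hget]
      have hdrop : card_list.drop k = card_list[k] :: card_list.drop (k + 1) :=
        List.drop_eq_getElem_cons hklt
      by_cases he : card_list[k] == num
      · rw [if_pos he]
        have harg : (k : Int) - (card_list.length : Int) - 1 + 1
            = ((k + 1 : Nat) : Int) - (card_list.length : Int) - 1 := by push_cast; ring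
        rw [harg, ih (k + 1) (acc ++ [card_list[k]]) (by omega) (by omega), hdrop]
        by_cases hall : (card_list.drop (k + 1)).all (fun x => x == num)
        · rw [if_pos hall, if_pos (by rw [List.all_cons, he, hall]; rfl)]
          simp
        · rw [if_neg (by simpa using hall),
            if_neg (by simp only [List.all_cons, he, Bool.true_and]; simpa using hall),
            List.takeWhile_cons]
          simp [he]
      · rw [if_neg he, if_neg (by rw [hdrop, List.all_cons]; simp [he]), hdrop,
          List.takeWhile_cons]
        simp [he]

-- A far out of range on the left: immediate IndexError
lemma goA_far (card_list : List Int) (num : Int) (bin_index : Int)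
    (h : bin_index + 1 + (card_list.length : Int) < 0) :
    checkEqualRight card_list num bin_index = [] := by
  unfold checkEqualRight
  rw [goA_none]
  rw [PySem.List.pyGet?_eq_none_iff]
  unfold PySem.Raise.InRange
  omega

-- the slice card_list[bin_index+1:] in the three regions
lemma slice_cases (card_list : List Int) (bin_index : Int) :
    PySem.List.slice card_list (some (bin_index + 1)) none
      = if 0 ≤ bin_index + 1 then card_list.drop (bin_index + 1).toNat
        else if 0 ≤ bin_index + 1 + (card_list.length : Int) then
          card_list.drop (bin_index + 1 + (card_list.length : Int)).toNat
        else card_list := by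
  rw [PySem.List.slice_some_none]
  unfold PySem.List.clampIdx
  by_cases h0 : 0 ≤ bin_index + 1
  · rw [if_neg (by omega), if_pos h0, min_def]
    split_ifs with h5
    · rfl
    · rw [List.drop_length]
      exact (List.drop_eq_nil_of_le (by omega)).symm
  · rw [if_pos (by omega), if_neg h0]
    by_cases h1 : 0 ≤ bin_index + 1 + (card_list.length : Int)
    · rw [if_neg (by omega), if_pos h1]
      congr 1
      omega
    · rw [if_pos (by omega), if_neg h1]
      simp

-- if the head is not num, the leading run is empty
lemma takeWhile_nil_of_head (card_list : List Int) (num : Int)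
    (h : ¬ card_list.head? = some num) :
    card_list.takeWhile (fun x => x == num) = [] := by
  cases card_list with
  | nil => rfl
  | cons y t =>
    by_cases hy : y = num
    · exact absurd (by rw [hy]; rfl) h
    · rw [List.takeWhile_cons]
      simp [hy]

theorem checkEqualRight_spec : Claim_unchanged_checkEqualRight := by
  intro card_list num bin_index _hdom
  unfold Spec_checkEqualRight
  intro hD
  rw [alt_eq, slice_cases]
  by_cases h0 : 0 ≤ bin_index + 1
  · rw [if_pos h0]
    unfold checkEqualRight
    have h := goA_nat card_list num (card_list.length + 1) (bin_index + 1).toNat [] (by omega)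
    rw [show (((bin_index + 1).toNat : Nat) : Int) - 1 = bin_index by omega] at h
    simpa using h
  · rw [if_neg h0]
    by_cases h1 : 0 ≤ bin_index + 1 + (card_list.length : Int)
    · rw [if_pos h1]
      unfold checkEqualRight
      have h := goA_neg card_list num (card_list.length + 1)
        (bin_index + 1 + (card_list.length : Int)).toNat [] (by omega) (by omega)
      rw [show (((bin_index + 1 + (card_list.length : Int)).toNat : Nat) : Int)
            - (card_list.length : Int) - 1 = bin_index by omega] at h
      rw [h]
      by_cases hall :
          (card_list.drop (bin_index + 1 + (card_list.length : Int)).toNat).all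
            (fun x => x == num)
      · rw [if_pos hall]
        have hhead : ¬ card_list.head? = some num := by
          intro hh
          exact hD ⟨by omega, hh, Or.inr (fun x hx => by
            simpa using List.all_eq_true.mp hall x hx)⟩
        rw [takeWhile_nil_of_head card_list num hhead,
          List.takeWhile_eq_self_iff.mpr (fun x hx => List.all_eq_true.mp hall x hx)]
        simp
      · rw [if_neg hall]
        simp
    · rw [if_neg h1, goA_far card_list num bin_index (by omega)]
      have hhead : ¬ card_list.head? = some num := fun hh =>
        hD ⟨by omega, hh, Or.inl (by omega)⟩
      rw [takeWhile_nil_of_head card_list num hhead]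

theorem checkEqualRight_changed : Claim_changed_checkEqualRight := by
  unfold Claim_changed_checkEqualRight pvDiffWitness_checkEqualRight pvDiffWitnessOut_checkEqualRight
  refine ⟨by decide, by decide, ?_, ?_, by decide⟩
  · exact goA_far [5] 5 (-3) (by norm_num)
  · rw [alt_eq]
    decide

theorem checkEqualRight_tight : Claim_exact_checkEqualRight := by
  intro card_list num bin_index _hdom hD hab
  obtain ⟨hneg, hhead, hor⟩ := hD
  rw [alt_eq, slice_cases, if_neg (by omega)] at hab
  obtain ⟨y, t, rfl⟩ : ∃ y t, card_list = y :: t := by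
    cases card_list with
    | nil => cases hhead
    | cons y t => exact ⟨y, t, rfl⟩
  have hy : y = num := by simpa using hhead
  have hTWc : (y :: t).takeWhile (fun x => x == num)
      = y :: t.takeWhile (fun x => x == num) := by
    rw [List.takeWhile_cons]
    simp [hy]
  by_cases h1 : 0 ≤ bin_index + 1 + ((y :: t).length : Int)
  · rw [if_pos h1] at hab
    have hall : ∀ x ∈ (y :: t).drop (bin_index + 1 + ((y :: t).length : Int)).toNat, x = num := by
      rcases hor with hfar | hall
      · omega
      · exact hall
    have hallb : ((y :: t).drop (bin_index + 1 + ((y :: t).length : Int)).toNat).all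
        (fun x => x == num) = true :=
      List.all_eq_true.mpr (fun x hx => by simpa using hall x hx)
    unfold checkEqualRight at hab
    have h := goA_neg (y :: t) num ((y :: t).length + 1)
      (bin_index + 1 + ((y :: t).length : Int)).toNat [] (by omega) (by omega)
    rw [show (((bin_index + 1 + ((y :: t).length : Int)).toNat : Nat) : Int)
          - ((y :: t).length : Int) - 1 = bin_index by omega] at h
    rw [h, if_pos hallb, hTWc] at hab
    set K := (bin_index + 1 + ((y :: t).length : Int)).toNat with hK
    have hle := (((y :: t).drop K).takeWhile_sublist (fun x => x == num)).length_le
    have hlen := congrArg List.length hab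
    simp only [List.nil_append, List.length_append, List.length_cons] at hlen
    omega
  · rw [if_neg h1, goA_far (y :: t) num bin_index (by omega), hTWc] at hab
    cases hab
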